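-- pv_equiv track=rewrite | github.com/mengchheanglong/directive-workspace | forge/source-packs/desloppify/desloppify/engine/_plan/triage/parsing.py | _short_issue_id_map
-- ===== SOURCE A (Python) =====
-- def _short_issue_id_map(valid_ids: set[str]) -> dict[str, str]:
--     short_map: dict[str, str] = {}
--     ambiguous_short: set[str] = set()
--     for valid_id in valid_ids:
--         suffix = valid_id.rsplit("::", 1)[-1]
--         short = suffix[:8].lower()
--         if not short:
--             continue
--         existing = short_map.get(short)
--         if existing is None:
--             short_map[short] = valid_id
--         elif existing != valid_id:
--             ambiguous_short.add(short)
--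
--     for short in ambiguous_short:
--         short_map.pop(short, None)
--     return short_map
-- ===== SOURCE B (Python) =====
-- def _short_issue_id_map(valid_ids):
--     # Positional brute-force scan, no bookkeeping dict/set: keep an entry exactly at the
--     # first position whose short prefix is nonempty, provided every later id with the
--     # same short prefix is the identical id.
--     def short(v):
--         return v.rsplit("::", 1)[-1][:8].lower()
--     ids = list(valid_ids)
--     out = {}
--     for i, v in enumerate(ids):
--         s = short(v)
--         if s and all(short(w) != s for w in ids[:i]) and all(short(w) != s or w == v for w in ids[i + 1:]):
--             out[s] = v
--     return out
-- ===== Notes on version B (the rewrite author's own statement) =====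
-- stated objective: alternative
-- what changed: Replaces A's single-pass dict-plus-ambiguous-set bookkeeping (tentative winner, flag collisions, delete afterwards) by a positional brute-force scan with no auxiliary state: an entry is emitted at index i exactly when its short prefix is nonempty, no earlier id has the same short, and every later id with the same short is the identical id.
import Mathlib
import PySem

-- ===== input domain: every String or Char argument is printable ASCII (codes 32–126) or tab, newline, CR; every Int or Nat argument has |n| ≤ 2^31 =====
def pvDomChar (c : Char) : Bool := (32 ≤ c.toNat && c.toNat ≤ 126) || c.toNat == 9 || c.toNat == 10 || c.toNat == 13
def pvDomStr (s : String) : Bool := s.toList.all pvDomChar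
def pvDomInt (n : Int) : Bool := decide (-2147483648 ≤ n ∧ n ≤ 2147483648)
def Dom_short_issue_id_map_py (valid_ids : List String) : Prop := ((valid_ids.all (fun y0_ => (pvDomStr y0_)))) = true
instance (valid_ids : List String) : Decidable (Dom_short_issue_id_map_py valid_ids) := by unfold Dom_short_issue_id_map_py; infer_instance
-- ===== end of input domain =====

-- B replaces A's dict+ambiguous-set bookkeeping by a positional brute-force scan
-- (first-occurrence test against the prefix, agreement test against the suffix): alternative, same results.


-- ===== PORT A =====
-- hand port of s.rsplit("::", 1)[-1] (PySem has no rsplit): scan the REVERSED string for the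
-- first "::" (= rightmost occurrence in s), accumulating the chars seen so far in original
-- order; exact: with maxsplit=1 only the rightmost "::" matters and [-1] is the part after it
def pvAfterSep : List Char → List Char → List Char
  | acc, ':' :: ':' :: _ => acc
  | acc, c :: rest => pvAfterSep (c :: acc) rest
  | acc, [] => acc

-- suffix[:8].lower() via PySem slice/lower (exact on the ASCII domain)
def pvShort (s : String) : String :=
  String.ofList (PySem.Chars.lower (PySem.List.slice (pvAfterSep [] s.toList.reverse) none (some 8)))

-- the body of A's loop
def pvStepA (st : PySem.Dict String String × PySem.Set String) (valid_id : String) :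
    PySem.Dict String String × PySem.Set String :=
  let short := pvShort valid_id
  if short = "" then st
  else match st.1.get? short with
    | none => (st.1.insert short valid_id, st.2)
    | some existing => if existing ≠ valid_id then (st.1, PySem.Set.add st.2 short) else st

def short_issue_id_map_py (valid_ids : List String) : List (String × String) :=
  let st := valid_ids.foldl pvStepA (PySem.Dict.empty, PySem.Set.empty)
  -- for short in ambiguous_short: short_map.pop(short, None); return short_map (as items)
  (st.2.foldl (fun m s => m.erase s) st.1).items

-- ===== PORT B =====
-- the body of B's loop: at index i keep (s, v) iff s nonempty, no id in ids[:i] has short s,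
-- and every id in ids[i+1:] with short s equals v
def pvStepB (ids : List String) (out : PySem.Dict String String) (p : Int × String) :
    PySem.Dict String String :=
  let i := p.1
  let v := p.2
  let s := pvShort v
  if (!(s == "")) && (PySem.List.slice ids none (some i)).all (fun w => !(pvShort w == s))
      && (PySem.List.slice ids (some (i + 1)) none).all (fun w => (pvShort w != s) || (w == v))
  then out.insert s v else out

def short_issue_id_map_py_alt (valid_ids : List String) : List (String × String) :=
  let ids := valid_ids
  ((PySem.List.enumerate ids 0).foldl (pvStepB ids) PySem.Dict.empty).items

-- ===== PRECONDITION & SPEC =====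
def Spec_short_issue_id_map_py (valid_ids : List String) (out : List (String × String)) : Prop := out = short_issue_id_map_py_alt valid_ids
instance (valid_ids : List String) (out : List (String × String)) : Decidable (Spec_short_issue_id_map_py valid_ids out) := by unfold Spec_short_issue_id_map_py; infer_instance

-- ===== CLAIM (what is proved, stated in full; the proofs are below) =====
def Claim_equal_short_issue_id_map_py : Prop := ∀ (valid_ids : List String), Dom_short_issue_id_map_py valid_ids → Spec_short_issue_id_map_py valid_ids (short_issue_id_map_py valid_ids)

-- ===== LEMMAS AND PROOFS =====

-- proof-only: the first-occurrence entry list A's dict holds after processing `rest` with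
-- already-processed prefix `pre`
def pvFo : List String → List String → List (String × String)
  | _, [] => []
  | pre, v :: t =>
    if (!(pvShort v == "")) && pre.all (fun w => !(pvShort w == pvShort v))
    then (pvShort v, v) :: pvFo (pre ++ [v]) t
    else pvFo (pre ++ [v]) t

-- proof-only: what B emits while scanning `rest` after prefix `pre`
def pvBspec : List String → List String → List (String × String)
  | _, [] => []
  | pre, v :: t =>
    if (!(pvShort v == "")) && pre.all (fun w => !(pvShort w == pvShort v))
        && t.all (fun w => (pvShort w != pvShort v) || (w == v))
    then (pvShort v, v) :: pvBspec (pre ++ [v]) t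
    else pvBspec (pre ++ [v]) t

-- proof-only: "s is an ambiguous short of l" (two distinct ids of l share it)
def pvPamb (l : List String) (s : String) : Prop :=
  s ≠ "" ∧ ∃ v ∈ l, ∃ w ∈ l, pvShort v = s ∧ pvShort w = s ∧ v ≠ w

-- A's post-pass pops every ambiguous key: as an items filter
lemma pv_erase_fold (amb : List String) (m : PySem.Dict String String) :
    (amb.foldl (fun m s => m.erase s) m).items
      = m.items.filter (fun p => !amb.contains p.1) := by
  induction amb generalizing m with
  | nil => simp
  | cons s t ih =>
    rw [List.foldl_cons, ih]
    simp only [PySem.Dict.erase, List.filter_filter]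
    apply List.filter_congr
    intro p _
    simp only [List.contains_cons]
    cases p.1 == s <;> cases t.contains p.1 <;> simp

-- snoc form of pvFo
lemma pvFo_append (xs : List String) (v : String) : ∀ pre,
    pvFo pre (xs ++ [v]) = pvFo pre xs ++
      (if (!(pvShort v == "")) && (pre ++ xs).all (fun w => !(pvShort w == pvShort v))
       then [(pvShort v, v)] else []) := by
  induction xs with
  | nil => intro pre; simp [pvFo]
  | cons x xs ih =>
    intro pre
    simp only [List.cons_append, pvFo]
    rw [ih (pre ++ [x]), show (pre ++ [x]) ++ xs = pre ++ x :: xs by simp]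
    split <;> simp

-- ambiguity verdicts persist when the prefix grows
lemma pvPamb_mono (pre : List String) (v s : String) :
    pvPamb pre s → pvPamb (pre ++ [v]) s := by
  rintro ⟨hne, a, ha, b, hb, rest⟩
  exact ⟨hne, a, List.mem_append_left _ ha, b, List.mem_append_left _ hb, rest⟩

-- appending an id changes no ambiguity verdict unless it collides with an earlier id
lemma pvPamb_append (pre : List String) (v s : String)
    (h : s ≠ "" → pvShort v = s → (v ∈ pre ∨ ∀ w ∈ pre, pvShort w ≠ s)) :
    pvPamb (pre ++ [v]) s ↔ pvPamb pre s := by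
  constructor
  · rintro ⟨hne, a, ha, b, hb, hsa, hsb, hab⟩
    have key : ∀ x ∈ pre ++ [v], pvShort x = s → (∀ y ∈ pre ++ [v], pvShort y = s → x ≠ y → False) ∨ x ∈ pre := by
      intro x hx hsx
      rcases List.mem_append.1 hx with hx' | hx'
      · exact Or.inr hx'
      · have hxv : x = v := by simpa using hx'
        rcases h hne (hxv ▸ hsx) with hv | hfree
        · exact Or.inr (hxv ▸ hv)
        · refine Or.inl ?_
          intro y hy hsy hxy
          rcases List.mem_append.1 hy with hy' | hy'
          · exact hfree y hy' hsy
          · have hyv : y = v := by simpa using hy'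
            exact hxy (hxv.trans hyv.symm)
    rcases key a ha hsa with bad | ha'
    · exact absurd (bad b hb hsb hab) (fun h => h)
    rcases key b hb hsb with bad | hb'
    · exact absurd (bad a ha hsa (Ne.symm hab)) (fun h => h)
    exact ⟨hne, a, ha', b, hb', hsa, hsb, hab⟩
  · rintro ⟨hne, a, ha, b, hb, rest⟩
    exact ⟨hne, a, List.mem_append_left _ ha, b, List.mem_append_left _ hb, rest⟩

-- find? over the grown prefix is unchanged unless the new id is the first hit
lemma pv_find?_append_unchanged (pre : List String) (v s : String)
    (h : pvShort v ≠ s ∨ (pre.find? (fun w => pvShort w == s)).isSome = true) :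
    (pre ++ [v]).find? (fun w => pvShort w == s) = pre.find? (fun w => pvShort w == s) := by
  rw [List.find?_append]
  cases hf : pre.find? (fun w => pvShort w == s) with
  | some e => rfl
  | none =>
    rcases h with h | h
    · simp [beq_eq_false_iff_ne.mpr h]
    · rw [hf] at h; simp at h

-- the invariant carried through A's fold
lemma pvA_inv (rest : List String) : ∀ (pre : List String)
    (m : PySem.Dict String String) (amb : PySem.Set String),
    m.items = pvFo [] pre →
    (∀ s : String, m.get? s = if s = "" then none else pre.find? (fun w => pvShort w == s)) →
    (∀ s : String, s ∈ amb ↔ pvPamb pre s) →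
    (rest.foldl pvStepA (m, amb)).1.items = pvFo [] (pre ++ rest)
    ∧ (∀ s : String, (rest.foldl pvStepA (m, amb)).1.get? s
        = if s = "" then none else (pre ++ rest).find? (fun w => pvShort w == s))
    ∧ (∀ s : String, s ∈ (rest.foldl pvStepA (m, amb)).2 ↔ pvPamb (pre ++ rest) s) := by
  induction rest with
  | nil =>
    intro pre m amb h1 h2 h3
    simp only [List.foldl_nil, List.append_nil]
    exact ⟨h1, h2, h3⟩
  | cons v t ih =>
    intro pre m amb h1 h2 h3
    rw [List.foldl_cons, show pre ++ v :: t = (pre ++ [v]) ++ t by simp]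
    by_cases hs : pvShort v = ""
    · have hstep : pvStepA (m, amb) v = (m, amb) := by simp [pvStepA, hs]
      rw [hstep]
      apply ih (pre ++ [v]) m amb
      · simp [pvFo_append pre v [], hs, h1]
      · intro s
        by_cases hse : s = ""
        · simp [hse, h2 ""]
        · rw [h2 s, if_neg hse, if_neg hse,
            pv_find?_append_unchanged pre v s (Or.inl (by rw [hs]; exact fun h => hse h.symm))]
      · intro s
        exact (h3 s).trans (pvPamb_append pre v s
          (fun hne hsv => ((hne (hs.symm.trans hsv).symm).elim))).symm
    · have hget := h2 (pvShort v)
      rw [if_neg hs] at hget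
      cases hfind : pre.find? (fun w => pvShort w == pvShort v) with
      | none =>
        rw [hfind] at hget
        have hnomem : ∀ w ∈ pre, pvShort w ≠ pvShort v := by
          intro w hw
          simpa using List.find?_eq_none.mp hfind w hw
        have hstep : pvStepA (m, amb) v = (m.insert (pvShort v) v, amb) := by
          simp [pvStepA, hs, hget]
        rw [hstep]
        apply ih (pre ++ [v]) _ amb
        · have hnc : m.contains (pvShort v) = false := by
            rw [PySem.Dict.contains_eq_isSome_get?, hget]; rfl
          have hall : ((([] : List String) ++ pre).all (fun w => !(pvShort w == pvShort v))) = true := by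
            rw [List.all_eq_true]
            intro w hw
            simpa using hnomem w (by simpa using hw)
          rw [PySem.Dict.items_insert_of_not_contains m v hnc, h1, pvFo_append pre v [],
            hall]
          simp [hs]
        · intro s
          by_cases hse : s = ""
          · rw [hse, if_pos rfl, PySem.Dict.get?_insert,
              if_neg (fun h => hs h.symm)]
            simpa using h2 ""
          · rw [if_neg hse, PySem.Dict.get?_insert]
            by_cases hss : s = pvShort v
            · rw [if_pos hss, hss, List.find?_append, hfind]
              simp
            · rw [if_neg hss, h2 s, if_neg hse,
                pv_find?_append_unchanged pre v s (Or.inl (fun h => hss h.symm))]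
        · intro s
          exact (h3 s).trans (pvPamb_append pre v s
            (fun hne hsv => Or.inr (hsv ▸ hnomem))).symm
      | some e =>
        rw [hfind] at hget
        have he_mem : e ∈ pre := List.mem_of_find?_eq_some hfind
        have he_sh : pvShort e = pvShort v := by simpa using List.find?_some hfind
        have hfo : pvFo [] (pre ++ [v]) = pvFo [] pre := by
          rw [pvFo_append pre v []]
          have hcf : ((!(pvShort v == "")) && ((([] : List String) ++ pre).all (fun w => !(pvShort w == pvShort v)))) = false := by
            simp only [Bool.and_eq_false_iff]
            refine Or.inr ?_
            simp only [List.nil_append, List.all_eq_false]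
            exact ⟨e, he_mem, by simp [he_sh]⟩
          rw [hcf]
          simp
        have hfind' : ∀ s, s ≠ "" → (pre ++ [v]).find? (fun w => pvShort w == s) = pre.find? (fun w => pvShort w == s) := by
          intro s hse
          by_cases hss : s = pvShort v
          · exact pv_find?_append_unchanged _ _ _ (Or.inr (by rw [hss, hfind]; rfl))
          · exact pv_find?_append_unchanged _ _ _ (Or.inl (fun h => hss h.symm))
        have hh2 : ∀ s : String, m.get? s = if s = "" then none else (pre ++ [v]).find? (fun w => pvShort w == s) := by
          intro s
          by_cases hse : s = ""
          · simp [hse, h2 ""]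
          · rw [h2 s, if_neg hse, if_neg hse, hfind' s hse]
        by_cases hev : e = v
        · have hstep : pvStepA (m, amb) v = (m, amb) := by
            simp [pvStepA, hs, hget, hev]
          rw [hstep]
          apply ih (pre ++ [v]) m amb (h1.trans hfo.symm) hh2
          intro s
          exact (h3 s).trans (pvPamb_append pre v s
            (fun hne hsv => Or.inl (hev ▸ he_mem))).symm
        · have hstep : pvStepA (m, amb) v = (m, PySem.Set.add amb (pvShort v)) := by
            simp [pvStepA, hs, hget, hev]
          rw [hstep]
          apply ih (pre ++ [v]) m _ (h1.trans hfo.symm) hh2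
          intro s
          rw [PySem.Set.mem_add]
          constructor
          · rintro (hmem | hs0)
            · exact pvPamb_mono pre v s ((h3 s).mp hmem)
            · exact hs0 ▸ ⟨hs, e, List.mem_append_left _ he_mem, v, by simp, he_sh, rfl, hev⟩
          · intro hp
            by_cases hss : s = pvShort v
            · exact Or.inr hss
            · exact Or.inl ((h3 s).mpr
                ((pvPamb_append pre v s (fun hne hsv => (hss hsv.symm).elim)).mp hp))

-- the invariant carried through B's fold
lemma pvB_inv (rest : List String) : ∀ (pre : List String) (ids : List String)
    (out : PySem.Dict String String), ids = pre ++ rest →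
    (∀ s : String, out.contains s = true → ∃ w ∈ pre, pvShort w = s) →
    ((PySem.List.enumerate rest (pre.length : Int)).foldl (pvStepB ids) out).items
      = out.items ++ pvBspec pre rest := by
  induction rest with
  | nil => intro pre ids out hids hc; simp [PySem.List.enumerate, pvBspec]
  | cons v t ih =>
    intro pre ids out hids hc
    have hids' : ids = (pre ++ [v]) ++ t := by simpa using hids
    have h1 : PySem.List.slice ids none (some (pre.length : Int)) = pre := by
      rw [hids, PySem.List.slice_to_natCast]
      exact List.take_left
    have h2 : PySem.List.slice ids (some ((pre.length : Int) + 1)) none = t := by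
      rw [show ((pre.length : Int) + 1) = ((pre.length + 1 : Nat) : Int) by push_cast; ring,
        PySem.List.slice_from_natCast, hids',
        show pre.length + 1 = (pre ++ [v]).length by simp]
      exact List.drop_left
    have hlen : ((pre.length : Int) + 1) = (((pre ++ [v]).length : Nat) : Int) := by
      simp
    rw [PySem.List.enumerate_cons, List.foldl_cons]
    show ((PySem.List.enumerate t ((pre.length : Int) + 1)).foldl (pvStepB ids)
      (pvStepB ids out ((pre.length : Int), v))).items = _
    simp only [pvStepB, h1, h2]
    by_cases hcond : ((!(pvShort v == "")) && pre.all (fun w => !(pvShort w == pvShort v))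
        && t.all (fun w => (pvShort w != pvShort v) || (w == v))) = true
    · rw [if_pos hcond]
      have hnc : out.contains (pvShort v) = false := by
        cases hco : out.contains (pvShort v) with
        | false => rfl
        | true =>
          obtain ⟨w, hw, hsw⟩ := hc _ hco
          have hcond' := hcond
          simp only [Bool.and_eq_true, List.all_eq_true] at hcond'
          have := hcond'.1.2 w hw
          simp [hsw] at this
      rw [hlen, ih (pre ++ [v]) ids (out.insert (pvShort v) v) hids' ?_]
      · rw [PySem.Dict.items_insert_of_not_contains out v hnc]
        simp only [pvBspec, if_pos hcond, List.append_assoc, List.singleton_append]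
      · intro s' hs'
        rw [PySem.Dict.contains_insert, Bool.or_eq_true] at hs'
        rcases hs' with h | h
        · exact ⟨v, by simp, by simpa using (eq_of_beq h).symm⟩
        · obtain ⟨w, hw, hsw⟩ := hc _ h
          exact ⟨w, by simp [hw], hsw⟩
    · rw [if_neg hcond, hlen, ih (pre ++ [v]) ids out hids'
        (fun s' h => (hc s' h).imp (fun w hw => ⟨by simp [hw.1], hw.2⟩))]
      simp only [pvBspec, if_neg hcond]

-- ambiguity of a first-occurrence short = disagreement in the suffix
lemma pv_amb_iff (pre : List String) (v : String) (t l : List String)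
    (hl : pre ++ v :: t = l) (hs : pvShort v ≠ "")
    (hpre : ∀ w ∈ pre, pvShort w ≠ pvShort v) :
    pvPamb l (pvShort v) ↔ ¬ (∀ w ∈ t, pvShort w = pvShort v → w = v) := by
  subst hl
  constructor
  · rintro ⟨-, a, ha, b, hb, hsa, hsb, hab⟩ hall
    have ca : a = v := by
      rcases List.mem_append.1 ha with h | h
      · exact absurd hsa (hpre a h)
      · rcases List.mem_cons.1 h with h | h
        · exact h
        · exact hall a h hsa
    have cb : b = v := by
      rcases List.mem_append.1 hb with h | h
      · exact absurd hsb (hpre b h)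
      · rcases List.mem_cons.1 h with h | h
        · exact h
        · exact hall b h hsb
    exact hab (ca.trans cb.symm)
  · intro hna
    push Not at hna
    obtain ⟨w, hw, hsw, hwv⟩ := hna
    exact ⟨hs, v, by simp, w, by simp [hw], rfl, hsw, fun h => hwv h.symm⟩

-- filtering A's entries by non-ambiguity yields B's list
lemma pvFo_filter (l : List String) (q : String × String → Bool)
    (hq : ∀ pre v t, pre ++ v :: t = l → pvShort v ≠ "" →
      (∀ w ∈ pre, pvShort w ≠ pvShort v) →
      q (pvShort v, v) = t.all (fun w => (pvShort w != pvShort v) || (w == v))) :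
    ∀ rest pre, pre ++ rest = l → (pvFo pre rest).filter q = pvBspec pre rest := by
  intro rest
  induction rest with
  | nil => intro pre _; simp [pvFo, pvBspec]
  | cons v t ih =>
    intro pre hl
    have hl' : (pre ++ [v]) ++ t = l := by simpa using hl
    simp only [pvFo, pvBspec]
    by_cases hc : ((!(pvShort v == "")) && pre.all (fun w => !(pvShort w == pvShort v))) = true
    · have hc' := hc
      rw [Bool.and_eq_true] at hc'
      obtain ⟨hc1, hc2⟩ := hc'
      have hs : pvShort v ≠ "" := by simpa using hc1
      have hp : ∀ w ∈ pre, pvShort w ≠ pvShort v := by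
        intro w hw
        simpa using List.all_eq_true.mp hc2 w hw
      rw [if_pos hc, List.filter_cons, hq pre v t hl hs hp, ih (pre ++ [v]) hl']
      simp [hc]
    · rw [if_neg hc, if_neg (by simp only [Bool.and_eq_true] at hc ⊢; tauto), ih (pre ++ [v]) hl']

-- ===== VERDICT (by name: the statement is the Claim_ definition above) =====
theorem short_issue_id_map_py_spec : Claim_equal_short_issue_id_map_py := by
  intro l _
  show short_issue_id_map_py l = short_issue_id_map_py_alt l
  obtain ⟨h1, h2, h3⟩ := pvA_inv l [] PySem.Dict.empty PySem.Set.empty rfl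
    (by intro s; simp)
    (by intro s; simp [PySem.Set.empty, pvPamb])
  simp only [List.nil_append] at h1 h2 h3
  have hA : short_issue_id_map_py l
      = (pvFo [] l).filter
          (fun p => !List.contains (l.foldl pvStepA (PySem.Dict.empty, PySem.Set.empty)).2 p.1) := by
    unfold short_issue_id_map_py
    rw [pv_erase_fold, h1]
  have hq : ∀ pre v t, pre ++ v :: t = l → pvShort v ≠ "" →
      (∀ w ∈ pre, pvShort w ≠ pvShort v) →
      ((fun p => !List.contains (l.foldl pvStepA (PySem.Dict.empty, PySem.Set.empty)).2 p.1)
          (pvShort v, v))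
        = t.all (fun w => (pvShort w != pvShort v) || (w == v)) := by
    intro pre v t hl hsv hpre
    show (!List.contains (l.foldl pvStepA (PySem.Dict.empty, PySem.Set.empty)).2 (pvShort v))
      = t.all (fun w => (pvShort w != pvShort v) || (w == v))
    have hiff := (h3 (pvShort v)).trans (pv_amb_iff pre v t l hl hsv hpre)
    by_cases hall : ∀ w ∈ t, pvShort w = pvShort v → w = v
    · have hc : (List.contains (l.foldl pvStepA (PySem.Dict.empty, PySem.Set.empty)).2 (pvShort v))
          = false := by
        simpa using fun hm => (hiff.mp hm) hall
      rw [hc]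
      symm
      simp only [Bool.not_false]
      rw [List.all_eq_true]
      intro w hw
      by_cases hwv : pvShort w = pvShort v
      · simp [hall w hw hwv]
      · simp [hwv]
    · have hc : (List.contains (l.foldl pvStepA (PySem.Dict.empty, PySem.Set.empty)).2 (pvShort v))
          = true := by
        simpa using hiff.mpr hall
      rw [hc]
      symm
      simp only [Bool.not_true]
      rw [List.all_eq_false]
      push Not at hall
      obtain ⟨w, hw, hsw, hwv⟩ := hall
      exact ⟨w, hw, by simp [hsw, hwv]⟩
  have hfilter := pvFo_filter l
    (fun p => !List.contains (l.foldl pvStepA (PySem.Dict.empty, PySem.Set.empty)).2 p.1)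
    hq l [] (by simp)
  have hB := pvB_inv l [] l PySem.Dict.empty (by simp)
    (by intro s h; simp [PySem.Dict.contains, PySem.Dict.empty] at h)
  simp only [List.length_nil, Nat.cast_zero] at hB
  calc short_issue_id_map_py l
      = (pvFo [] l).filter
          (fun p => !List.contains (l.foldl pvStepA (PySem.Dict.empty, PySem.Set.empty)).2 p.1) := hA
    _ = pvBspec [] l := hfilter
    _ = short_issue_id_map_py_alt l := by
        show _ = ((PySem.List.enumerate l 0).foldl (pvStepB l) PySem.Dict.empty).items
        rw [hB]
        simp [PySem.Dict.empty]
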